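-- pv_equiv track=rewrite | github.com/seecr/meresco-core | src/components/drilldown/srudrilldownadapter.py | generatorDecorate
-- ===== SOURCE A (Python) =====
-- def generatorDecorate(before, data, after):
--     beforeWritten = False
--     for d in data:
--         if not beforeWritten:
--             yield before
--             beforeWritten = True
--         yield d
--     if beforeWritten:
--         yield after
-- ===== SOURCE B (Python) =====
-- def generatorDecorate(before, data, after):
--     items = list(data)
--     yield from ([before, *items, after] if items else [])
-- ===== Notes on version B (the rewrite author's own statement) =====
-- stated objective: simpler
-- what changed: Eliminates the streaming yield-loop and the beforeWritten flag entirely: B materializes the data once and returns an iterator over the closed-form concatenation [before, *items, after] (or the empty list when data is empty).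
import Mathlib
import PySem

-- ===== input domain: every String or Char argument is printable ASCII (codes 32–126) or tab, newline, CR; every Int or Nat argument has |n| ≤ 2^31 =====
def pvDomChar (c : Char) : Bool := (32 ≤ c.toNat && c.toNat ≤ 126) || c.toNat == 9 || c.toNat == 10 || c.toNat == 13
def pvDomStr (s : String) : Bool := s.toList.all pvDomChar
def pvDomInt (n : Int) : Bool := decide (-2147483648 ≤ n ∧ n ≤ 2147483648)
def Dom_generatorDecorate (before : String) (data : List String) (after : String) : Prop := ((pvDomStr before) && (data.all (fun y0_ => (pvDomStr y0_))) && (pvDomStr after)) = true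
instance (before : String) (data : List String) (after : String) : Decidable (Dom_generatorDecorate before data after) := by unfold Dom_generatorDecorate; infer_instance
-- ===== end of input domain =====

-- B replaces A's streaming loop-with-flag by a single closed-form concatenation; objective: simpler.

-- ===== PORT A =====
-- Port of A: fold over data carrying the beforeWritten flag and the yielded output.
def generatorDecorate (before : String) (data : List String) (after : String) : List String :=
  let st := data.foldl (fun (st : Bool × List String) d =>
    let (beforeWritten, out) := st
    if !beforeWritten then (true, out ++ [before, d]) else (beforeWritten, out ++ [d]))
    (false, [])
  if st.1 then st.2 ++ [after] else st.2

-- ===== PORT B =====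
-- Port of B: closed-form concatenation, no loop: [] if data is empty, else [before] ++ data ++ [after].
def generatorDecorate_alt (before : String) (data : List String) (after : String) : List String :=
  if data.isEmpty then [] else [before] ++ data ++ [after]

-- ===== PRECONDITION & SPEC =====
def Spec_generatorDecorate (before : String) (data : List String) (after : String) (out : List String) : Prop := out = generatorDecorate_alt before data after
instance (before : String) (data : List String) (after : String) (out : List String) : Decidable (Spec_generatorDecorate before data after out) := by unfold Spec_generatorDecorate; infer_instance

-- ===== CLAIM (what is proved, stated in full; the proofs are below) =====
def Claim_equal_generatorDecorate : Prop := ∀ (before : String) (data : List String) (after : String), Dom_generatorDecorate before data after → Spec_generatorDecorate before data after (generatorDecorate before data after)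

-- ===== LEMMAS AND PROOFS =====
-- Loop invariant of A's fold: once the flag is set, the fold just appends the remaining data.
lemma foldA_true (before : String) (rest : List String) (out : List String) :
    rest.foldl (fun (st : Bool × List String) d =>
      if st.1 = false then (true, st.2 ++ [before, d]) else (st.1, st.2 ++ [d]))
      (true, out) = (true, out ++ rest) := by
  induction rest generalizing out with
  | nil => simp
  | cons x xs ih => simp [List.foldl_cons, ih]

-- ===== VERDICT (by name: the statement is the Claim_ definition above) =====
theorem generatorDecorate_spec : Claim_equal_generatorDecorate := by
  intro before data after _
  show generatorDecorate before data after = generatorDecorate_alt before data after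
  cases data with
  | nil => rfl
  | cons first rest =>
    simp [generatorDecorate, generatorDecorate_alt, List.foldl_cons, foldA_true]
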